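-- pv_equiv track=rewrite | github.com/josephtingiris/vscode-keyboard-navigation | bin/keybindings-sort.py | group_objects_with_comments
-- ===== SOURCE A (Python) =====
-- from typing import List, Tuple
--
-- def group_objects_with_comments(array_text: str) -> Tuple[List[Tuple[str, str]], str]:
--     groups = []
--     comments = ''
--     buf = ''
--     depth = 0
--     in_obj = False
--     for line in array_text.splitlines(keepends=True):
--         stripped = line.strip()
--         if not in_obj:
--             if '{' in stripped:
--                 in_obj = True
--                 depth = stripped.count('{') - stripped.count('}')
--                 buf = line
--             else:
--                 comments += line
--         else:
--             buf += line
--             depth += line.count('{') - line.count('}')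
--             if depth == 0:
--                 groups.append((comments, buf))
--                 comments = ''
--                 buf = ''
--                 in_obj = False
--     trailing_comments = comments
--     return groups, trailing_comments
-- ===== SOURCE B (Python) =====
-- from typing import List, Tuple
--
-- def group_objects_with_comments(array_text: str) -> Tuple[List[Tuple[str, str]], str]:
--     # Recursive decomposition over the line list: peel off the comment prefix,
--     # locate the object's closing line by a running prefix sum of brace deltas,
--     # build the group from slices with ''.join, and recurse on the remainder.
--     lines = array_text.splitlines(keepends=True)
--
--     def delta(l: str) -> int:
--         return l.count('{') - l.count('}')
--
--     def go(ls: List[str]) -> Tuple[List[Tuple[str, str]], str]: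
--         j = 0
--         while j < len(ls) and '{' not in ls[j].strip():
--             j += 1
--         comments = ''.join(ls[:j])
--         if j == len(ls):
--             return [], comments
--         s = delta(ls[j].strip())
--         e = None
--         for k in range(j + 1, len(ls)):
--             s += delta(ls[k])
--             if s == 0:
--                 e = k
--                 break
--         if e is None:
--             return [], comments
--         groups, trailing = go(ls[e + 1:])
--         return [(comments, ''.join(ls[j:e + 1]))] + groups, trailing
--
--     return go(lines)
-- ===== Notes on version B (the rewrite author's own statement) =====
-- stated objective: alternative
-- what changed: A's single fold that threads a five-field mutable state (groups, comments, buf, depth, in_obj) through every line is replaced by a recursive decomposition over the line list: each call peels off the comment prefix, locates the object's closing line via a running prefix sum of per-line brace deltas, assembles the group by joining list slices instead of incremental string accumulation, and recurses on the remainder, consing results front-to-back.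
import Mathlib
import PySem

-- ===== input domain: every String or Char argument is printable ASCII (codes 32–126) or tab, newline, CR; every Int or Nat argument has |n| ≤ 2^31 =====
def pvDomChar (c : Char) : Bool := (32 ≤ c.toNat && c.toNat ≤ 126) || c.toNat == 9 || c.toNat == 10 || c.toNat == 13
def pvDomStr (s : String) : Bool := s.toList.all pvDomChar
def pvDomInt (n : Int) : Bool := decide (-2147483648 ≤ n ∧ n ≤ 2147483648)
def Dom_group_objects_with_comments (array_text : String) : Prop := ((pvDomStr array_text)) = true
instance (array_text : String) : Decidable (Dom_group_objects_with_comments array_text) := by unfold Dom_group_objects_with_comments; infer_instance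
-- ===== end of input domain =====

-- ===== PORT A =====
-- B replaces A's incremental five-field state machine by a recursive decomposition
-- that splits off the comment prefix, finds the closing line by a prefix sum of
-- brace deltas, and builds each group from slices with join; return values agree.
-- shared helper: hand port of str.splitlines(keepends=True); exact on the Dom alphabet,
-- where the only line breaks are '\n', '\r' and '\r\n'.
def pvSplitKeepAux : List Char → List Char → List (List Char)
  | acc, [] => if acc = [] then [] else [acc.reverse]
  | acc, '\r' :: '\n' :: rest => (acc.reverse ++ ['\r', '\n']) :: pvSplitKeepAux [] rest
  | acc, '\r' :: rest => (acc.reverse ++ ['\r']) :: pvSplitKeepAux [] rest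
  | acc, '\n' :: rest => (acc.reverse ++ ['\n']) :: pvSplitKeepAux [] rest
  | acc, c :: rest => pvSplitKeepAux (c :: acc) rest

def pvLines (array_text : String) : List String :=
  (pvSplitKeepAux [] array_text.toList).map String.ofList

-- one step of A's for-loop; state = (groups, comments, buf, depth, in_obj)
def goStep (st : (List (String × String)) × String × String × Int × Bool) (line : String) :
    (List (String × String)) × String × String × Int × Bool :=
  match st with
  | (groups, comments, buf, depth, inObj) =>
    let stripped := PySem.Str.strip line
    if !inObj then
      if PySem.Str.isIn "{" stripped then
        (groups, comments, line,
          (PySem.Str.count stripped "{" : Int) - (PySem.Str.count stripped "}" : Int), true)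
      else
        (groups, comments ++ line, buf, depth, inObj)
    else
      let buf' := buf ++ line
      let depth' := depth + ((PySem.Str.count line "{" : Int) - (PySem.Str.count line "}" : Int))
      if depth' = 0 then (groups ++ [(comments, buf')], "", "", 0, false)
      else (groups, comments, buf', depth', true)

def group_objects_with_comments (array_text : String) : (List (String × String)) × String :=
  let st := (pvLines array_text).foldl goStep ([], "", "", 0, false)
  (st.1, st.2.1)

-- ===== PORT B =====
-- Source B helper delta(l) = l.count('{') - l.count('}')
def altDelta (l : String) : Int :=
  (PySem.Str.count l "{" : Int) - (PySem.Str.count l "}" : Int)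

-- Source B's leading while loop: split off the comment prefix (lines whose strip has no '{')
def altCms : List String → List String × List String
  | [] => ([], [])
  | l :: rest =>
    if PySem.Str.isIn "{" (PySem.Str.strip l) then ([], l :: rest)
    else
      let p := altCms rest
      (l :: p.1, p.2)

theorem altCms_snd_length : ∀ (ls : List String), (altCms ls).2.length ≤ ls.length := by
  intro ls
  induction ls with
  | nil => simp [altCms]
  | cons l rest ih =>
    simp only [altCms]
    split
    · simp
    · simp only [List.length_cons]; omega

-- Source B's for-k loop: running prefix sum s; returns (object lines after the opener, rest)
def altClose : List String → Int → Option (List String × List String)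
  | [], _ => none
  | l :: rest, s =>
    let s' := s + altDelta l
    if s' = 0 then some ([l], rest)
    else
      match altClose rest s' with
      | none => none
      | some (o, r) => some (l :: o, r)

theorem altClose_length : ∀ (ls : List String) (s : Int) (o : List String) (r : List String),
    altClose ls s = some (o, r) → r.length < ls.length := by
  intro ls
  induction ls with
  | nil => intro s o r h; simp [altClose] at h
  | cons l rest ih =>
    intro s o r h
    simp only [altClose] at h
    split at h
    · cases h; simp
    · split at h
      · exact absurd h (by simp)
      · next o' r' h' =>
        cases h
        have := ih _ _ _ h'
        simp only [List.length_cons]; omega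

-- Source B's recursive go over the line list
def altGo (ls : List String) : (List (String × String)) × String :=
  let p := altCms ls
  let comments := PySem.Str.join "" p.1
  match _hr : p.2 with
  | [] => ([], comments)
  | l :: rest' =>
    match _h : altClose rest' (altDelta (PySem.Str.strip l)) with
    | none => ([], comments)
    | some (o, r) =>
      let g := altGo r
      ((comments, PySem.Str.join "" (l :: o)) :: g.1, g.2)
termination_by ls.length
decreasing_by
  have h1 := altCms_snd_length ls
  rw [_hr] at h1
  have h2 := altClose_length _ _ _ _ _h
  simp only [List.length_cons] at h1
  omega

def group_objects_with_comments_alt (array_text : String) : (List (String × String)) × String :=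
  altGo (pvLines array_text)

-- ===== PRECONDITION & SPEC =====
def Spec_group_objects_with_comments (array_text : String) (out : (List (String × String)) × String) : Prop := out = group_objects_with_comments_alt array_text
instance (array_text : String) (out : (List (String × String)) × String) : Decidable (Spec_group_objects_with_comments array_text out) := by unfold Spec_group_objects_with_comments; infer_instance

-- ===== CLAIM (what is proved, stated in full; the proofs are below) =====
def Claim_equal_group_objects_with_comments : Prop := ∀ (array_text : String), Dom_group_objects_with_comments array_text → Spec_group_objects_with_comments array_text (group_objects_with_comments array_text)

-- ===== LEMMAS AND PROOFS =====

-- ''.join of a cons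
theorem join_cons (s : String) (l : List String) :
    PySem.Str.join "" (s :: l) = s ++ PySem.Str.join "" l := by
  apply String.toList_injective
  simp only [PySem.Str.toList_join, String.toList_append, List.map_cons]
  cases l with
  | nil => simp [PySem.Chars.join_singleton, PySem.Chars.join_nil]
  | cons y r => simp [PySem.Chars.join_cons_cons]

theorem join_nil : PySem.Str.join "" ([] : List String) = "" := by
  apply String.toList_injective
  simp [PySem.Str.toList_join]

-- intermediate description of A's loop, used only by the proof: an explicit
-- inner/outer while-loop pair equivalent to A's fold (proved below), which is
-- then related to B's altGo.
def altInner : List String → String → Int → Option (String × List String)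
  | [], _, _ => none
  | l :: rest, buf, depth =>
    let buf' := buf ++ l
    let depth' := depth + altDelta l
    if depth' = 0 then some (buf', rest) else altInner rest buf' depth'

theorem altInner_some_length : ∀ (ls : List String) (buf : String) (d : Int) (b : String)
    (r : List String), altInner ls buf d = some (b, r) → r.length < ls.length := by
  intro ls
  induction ls with
  | nil => intro buf d b r h; simp [altInner] at h
  | cons l rest ih =>
    intro buf d b r h
    simp only [altInner] at h
    split at h
    · cases h; simp
    · have := ih _ _ _ _ h
      simp only [List.length_cons]
      omega

def altOuter (ls : List String) (comments : String) : (List (String × String)) × String :=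
  match ls with
  | [] => ([], comments)
  | l :: rest =>
    let s := PySem.Str.strip l
    if PySem.Str.isIn "{" s then
      match _h : altInner rest l (altDelta s) with
      | some (buf, rest') =>
        ((comments, buf) :: (altOuter rest' "").1, (altOuter rest' "").2)
      | none => ([], comments)
    else altOuter rest (comments ++ l)
termination_by ls.length
decreasing_by
  · have := altInner_some_length _ _ _ _ _ _h
    simp only [List.length_cons]; omega
  · simp

theorem goStep_false (g : List (String × String)) (c b : String) (d : Int) (l : String) :
    goStep (g, c, b, d, false) l =
      (if PySem.Str.isIn "{" (PySem.Str.strip l) then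
        (g, c, l, altDelta (PySem.Str.strip l), true)
      else (g, c ++ l, b, d, false)) := by
  by_cases hin : PySem.Str.isIn "{" (PySem.Str.strip l)
  · simp only [goStep, altDelta, hin, if_true, Bool.not_false]
  · simp only [goStep, altDelta, hin, Bool.not_false, ite_true, Bool.false_eq_true, if_false]

theorem goStep_true (g : List (String × String)) (c b : String) (d : Int) (l : String) :
    goStep (g, c, b, d, true) l =
      (if d + altDelta l = 0 then
        (g ++ [(c, b ++ l)], "", "", 0, false)
      else (g, c, b ++ l, d + altDelta l, true))
    := rfl

-- A's fold, while in_obj, tracks the inner loop exactly (closing case)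
theorem inner_some : ∀ (ls : List String) (buf : String) (d : Int) (g : List (String × String))
    (c b : String) (r : List String), altInner ls buf d = some (b, r) →
    ls.foldl goStep (g, c, buf, d, true) = r.foldl goStep (g ++ [(c, b)], "", "", 0, false) := by
  intro ls
  induction ls with
  | nil => intro buf d g c b r h; simp [altInner] at h
  | cons l rest ih =>
    intro buf d g c b r h
    simp only [altInner] at h
    simp only [List.foldl_cons, goStep_true]
    by_cases hd : d + altDelta l = 0
    · rw [if_pos hd] at h ⊢
      obtain ⟨rfl, rfl⟩ := Prod.mk.injEq .. ▸ Option.some.inj h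
      rfl
    · rw [if_neg hd] at h ⊢
      exact ih _ _ _ _ _ _ h

-- A's fold, while in_obj, never touches groups or comments (non-closing case)
theorem inner_none : ∀ (ls : List String) (buf : String) (d : Int) (g : List (String × String))
    (c : String), altInner ls buf d = none →
    ∃ b' d', ls.foldl goStep (g, c, buf, d, true) = (g, c, b', d', true) := by
  intro ls
  induction ls with
  | nil => intro buf d g c _; exact ⟨buf, d, rfl⟩
  | cons l rest ih =>
    intro buf d g c h
    simp only [altInner] at h
    simp only [List.foldl_cons, goStep_true]
    by_cases hd : d + altDelta l = 0
    · rw [if_pos hd] at h; exact absurd h (by simp)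
    · rw [if_neg hd] at h ⊢
      exact ih _ _ _ _ h

-- A's fold from a not-in-obj state computes the outer loop
theorem main_inv : ∀ (n : Nat) (ls : List String), ls.length ≤ n →
    ∀ (g : List (String × String)) (c b : String) (d : Int),
    ((ls.foldl goStep (g, c, b, d, false)).1, (ls.foldl goStep (g, c, b, d, false)).2.1)
      = (g ++ (altOuter ls c).1, (altOuter ls c).2) := by
  intro n
  induction n with
  | zero =>
    intro ls h g c b d
    rw [List.length_eq_zero_iff.mp (Nat.le_zero.mp h)]
    simp [altOuter]
  | succ m ih =>
    intro ls h g c b d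
    match ls with
    | [] => simp [altOuter]
    | l :: rest =>
      have hl : rest.length ≤ m := by simp only [List.length_cons] at h; omega
      simp only [List.foldl_cons, goStep_false]
      by_cases hin : PySem.Str.isIn "{" (PySem.Str.strip l)
      · rw [if_pos hin]
        rcases hI : altInner rest l (altDelta (PySem.Str.strip l)) with _ | ⟨bf, r⟩
        · obtain ⟨b', d', heq⟩ := inner_none rest _ _ g c hI
          rw [heq, altOuter]
          simp only [hin, if_pos]
          split
          · next h' => rw [hI] at h'; exact absurd h' (by simp)
          · simp
        · rw [inner_some rest _ _ g c bf r hI]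
          have hr : r.length ≤ m := by
            have := altInner_some_length _ _ _ _ _ hI; omega
          rw [ih r hr (g ++ [(c, bf)]) "" "" 0]
          rw [altOuter]
          simp only [hin, if_pos]
          split
          · next b2 r2 h' =>
            rw [hI] at h'
            obtain ⟨rfl, rfl⟩ := Prod.mk.injEq .. ▸ Option.some.inj h'
            simp
          · next h' => rw [hI] at h'; exact absurd h' (by simp)
      · rw [if_neg hin]
        rw [ih rest hl g (c ++ l) b d]
        rw [altOuter]
        simp only [hin, if_neg, Bool.false_eq_true, not_false_iff]

-- prepend pending comments to B's result, the way A's accumulator would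
def glue (c : String) (p : (List (String × String)) × String) :
    (List (String × String)) × String :=
  match p with
  | ([], t) => ([], c ++ t)
  | ((c0, b0) :: r, t) => ((c ++ c0, b0) :: r, t)

theorem glue_empty (p : (List (String × String)) × String) : glue "" p = p := by
  rcases p with ⟨gs, t⟩
  rcases gs with _ | ⟨⟨c0, b0⟩, r⟩ <;> simp [glue, String.empty_append]

theorem glue_glue (c l : String) (p : (List (String × String)) × String) :
    glue c (glue l p) = glue (c ++ l) p := by
  rcases p with ⟨gs, t⟩
  rcases gs with _ | ⟨⟨c0, b0⟩, r⟩ <;> simp [glue, String.append_assoc]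

-- the inner while-loop computes altClose with the buffer joined on
theorem inner_eq_close : ∀ (ls : List String) (buf : String) (d : Int),
    altInner ls buf d =
      (altClose ls d).map (fun p => (buf ++ PySem.Str.join "" p.1, p.2)) := by
  intro ls
  induction ls with
  | nil => intro buf d; simp [altInner, altClose]
  | cons l rest ih =>
    intro buf d
    simp only [altInner, altClose]
    by_cases hd : d + altDelta l = 0
    · rw [if_pos hd, if_pos hd]
      simp [join_cons, join_nil]
    · rw [if_neg hd, if_neg hd, ih]
      rcases altClose rest (d + altDelta l) with _ | ⟨o, r⟩
      · rfl
      · simp [join_cons, String.append_assoc]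

-- unfolding equations for altGo, one per branch
theorem altCms_cons_pos (l : String) (ls : List String)
    (h : PySem.Str.isIn "{" (PySem.Str.strip l) = true) :
    altCms (l :: ls) = ([], l :: ls) := by
  simp only [altCms]; rw [if_pos h]

theorem altCms_cons_neg (l : String) (ls : List String)
    (h : ¬ PySem.Str.isIn "{" (PySem.Str.strip l) = true) :
    altCms (l :: ls) = (l :: (altCms ls).1, (altCms ls).2) := by
  simp only [altCms]; rw [if_neg h]

theorem altGo_eq_nil (ls : List String) (h : (altCms ls).2 = []) :
    altGo ls = ([], PySem.Str.join "" (altCms ls).1) := by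
  rw [altGo]
  split
  · rfl
  · next l rest' hr => rw [h] at hr; cases hr

theorem altGo_eq_none (ls : List String) (l : String) (rest' : List String)
    (h : (altCms ls).2 = l :: rest')
    (h2 : altClose rest' (altDelta (PySem.Str.strip l)) = none) :
    altGo ls = ([], PySem.Str.join "" (altCms ls).1) := by
  rw [altGo]
  split
  · rfl
  · next l2 rest2 hr =>
    rw [h] at hr
    cases hr
    split
    · rfl
    · next o r hcl => rw [h2] at hcl; cases hcl

theorem altGo_eq_some (ls : List String) (l : String) (rest' : List String)
    (o : List String) (r : List String)
    (h : (altCms ls).2 = l :: rest')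
    (h2 : altClose rest' (altDelta (PySem.Str.strip l)) = some (o, r)) :
    altGo ls = ((PySem.Str.join "" (altCms ls).1, PySem.Str.join "" (l :: o)) :: (altGo r).1,
      (altGo r).2) := by
  rw [altGo]
  split
  · next hr => rw [h] at hr; cases hr
  · next l2 rest2 hr =>
    rw [h] at hr
    cases hr
    split
    · next hcl => rw [h2] at hcl; cases hcl
    · next o2 r2 hcl =>
      rw [h2] at hcl
      obtain ⟨rfl, rfl⟩ := Prod.mk.injEq .. ▸ Option.some.inj hcl
      rfl

-- peeling one comment line off altGo
theorem altGo_comment (l : String) (ls : List String)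
    (hin : ¬ PySem.Str.isIn "{" (PySem.Str.strip l) = true) :
    altGo (l :: ls) = glue l (altGo ls) := by
  have hc := altCms_cons_neg l ls hin
  have hc2 : (altCms (l :: ls)).2 = (altCms ls).2 := by rw [hc]
  have hc1 : (altCms (l :: ls)).1 = l :: (altCms ls).1 := by rw [hc]
  rcases hr : (altCms ls).2 with _ | ⟨x, rest'⟩
  · rw [altGo_eq_nil (l :: ls) (hc2.trans hr), altGo_eq_nil ls hr, hc1, join_cons]
    simp [glue]
  · rcases hcl : altClose rest' (altDelta (PySem.Str.strip x)) with _ | ⟨o, r⟩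
    · rw [altGo_eq_none (l :: ls) x rest' (hc2.trans hr) hcl, altGo_eq_none ls x rest' hr hcl,
        hc1, join_cons]
      simp [glue]
    · rw [altGo_eq_some (l :: ls) x rest' o r (hc2.trans hr) hcl,
        altGo_eq_some ls x rest' o r hr hcl, hc1, join_cons]
      simp [glue]

-- the outer loop is B's altGo with the pending comments glued on
theorem outer_eq_go : ∀ (n : Nat) (ls : List String), ls.length ≤ n →
    ∀ (c : String), altOuter ls c = glue c (altGo ls) := by
  intro n
  induction n with
  | zero =>
    intro ls h c
    rw [List.length_eq_zero_iff.mp (Nat.le_zero.mp h)]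
    rw [altOuter, altGo_eq_nil [] rfl]
    simp [altCms, join_nil, glue]
  | succ m ih =>
    intro ls h c
    match ls with
    | [] =>
      rw [altOuter, altGo_eq_nil [] rfl]
      simp [altCms, join_nil, glue]
    | l :: rest =>
      have hl : rest.length ≤ m := by simp only [List.length_cons] at h; omega
      by_cases hin : PySem.Str.isIn "{" (PySem.Str.strip l)
      · rw [altOuter]
        simp only [hin, if_pos]
        have hc := altCms_cons_pos l rest hin
        have hc2 : (altCms (l :: rest)).2 = l :: rest := by rw [hc]
        have hc1 : (altCms (l :: rest)).1 = [] := by rw [hc]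
        rcases hcl : altClose rest (altDelta (PySem.Str.strip l)) with _ | ⟨o, r⟩
        · have hI : altInner rest l (altDelta (PySem.Str.strip l)) = none := by
            rw [inner_eq_close, hcl]; rfl
          split
          · next h' => rw [hI] at h'; exact absurd h' (by simp)
          · rw [altGo_eq_none (l :: rest) l rest hc2 hcl, hc1, join_nil]
            simp [glue]
        · have hI : altInner rest l (altDelta (PySem.Str.strip l))
              = some (l ++ PySem.Str.join "" o, r) := by
            rw [inner_eq_close, hcl]; rfl
          split
          · next bf r' h' =>
            rw [hI] at h'
            obtain ⟨h1, h2⟩ := Prod.mk.injEq .. ▸ Option.some.inj h'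
            subst h1; subst h2
            have hrm : r.length ≤ m := by
              have := altClose_length _ _ _ _ hcl
              simp only [List.length_cons] at h; omega
            rw [ih r hrm "", glue_empty]
            rw [altGo_eq_some (l :: rest) l rest o r hc2 hcl, hc1, join_nil, join_cons]
            simp [glue]
          · next h' => rw [hI] at h'; exact absurd h' (by simp)
      · rw [altOuter]
        simp only [hin, if_neg, Bool.false_eq_true, not_false_iff]
        rw [ih rest hl (c ++ l), altGo_comment l rest hin, glue_glue]

-- ===== VERDICT (by name: the statement is the Claim_ definition above) =====
theorem group_objects_with_comments_spec : Claim_equal_group_objects_with_comments := by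
  intro s _
  show _ = group_objects_with_comments_alt s
  unfold group_objects_with_comments group_objects_with_comments_alt
  have h1 := main_inv (pvLines s).length (pvLines s) le_rfl [] "" "" 0
  have h2 := outer_eq_go (pvLines s).length (pvLines s) le_rfl ""
  rw [glue_empty] at h2
  simp only [h2, List.nil_append] at h1
  exact h1
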